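-- pv_equiv track=rewrite | github.com/jasoneveleth/dfa2regex | main.py | construct_dfa
-- ===== SOURCE A (Python) =====
-- e = "\u03B5" # epsilon
--
-- def union(*args):
--     """returns a string of the union of input regex's (input as strings)"""
--     on_our_first = True
--     ret = ""
--     for r in args:
--         if r == "":
--             continue
--
--         if not on_our_first and len(r) >= 2:
--             ret += f'({r})'
--         else:
--             ret += r
--
--         on_our_first = False
--
--         if ret != "": # only want to union if there's something there
--             ret += 'U'
--     return ret[:-1] # cut off last U
--
-- def construct_dfa(fa):
--     """turn input string into dfa"""
--     i = 0
--     lines = fa.split('\n')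
--
--     start_state = lines[i]
--     i += 2 # skip over next line too
--
--     transition = {"start": {start_state: e}, "end": {}}
--
--     # handle all the arrows and break at the next comment
--     while i < len(lines):
--         if lines[i][0] == '#':
--             i += 1
--             break
--         line = lines[i]
--         src, tmp = line.split(':')
--         regex, dst = tmp.split('>')
--         if src not in transition:
--             transition[src] = {dst: regex}
--         else:
--             if dst in transition[src]:
--                 transition[src][dst] = union(regex, transition[src][dst])
--             else:
--                 transition[src][dst] = regex
--         i += 1
--
--     # handle all accept states
--     while i < len(lines):
--         if lines[i] not in transition:
--             transition[lines[i]] = {"end": e}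
--         else:
--             transition[lines[i]]["end"] = e
--         i += 1
--     return transition
-- ===== SOURCE B (Python) =====
-- from functools import reduce
--
-- e = "\u03B5" # epsilon
--
-- def union(*args):
--     """returns a string of the union of input regex's (input as strings)"""
--     on_our_first = True
--     ret = ""
--     for r in args:
--         if r == "":
--             continue
--         if not on_our_first and len(r) >= 2:
--             ret += f'({r})'
--         else:
--             ret += r
--         on_our_first = False
--         if ret != "":
--             ret += 'U'
--     return ret[:-1]
--
-- def _parse(line):
--     src, tmp = line.split(':')
--     regex, dst = tmp.split('>')
--     return src, dst, regex
--
-- def construct_dfa(fa):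
--     """turn input string into dfa (staged: cut, group, fold, accepts)"""
--     lines = fa.split('\n')
--     body = lines[2:]
--     # stage 1: locate the '#' boundary
--     cut = next((k for k, l in enumerate(body) if l[0] == '#'), len(body))
--     # stage 2: group each edge's regexes per (src, dst) in encounter order
--     groups = {"start": {lines[0]: [e]}, "end": {}}
--     for l in body[:cut]:
--         src, dst, regex = _parse(l)
--         groups.setdefault(src, {}).setdefault(dst, []).append(regex)
--     # stage 3: fold every regex list into one string
--     transition = {s: {d: reduce(lambda acc, r: union(r, acc), rs[1:], rs[0])
--                       for d, rs in ds.items()}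
--                   for s, ds in groups.items()}
--     # stage 4: accept states
--     for s in body[cut + 1:]:
--         transition.setdefault(s, {})["end"] = e
--     return transition
-- ===== Notes on version B (the rewrite author's own statement) =====
-- stated objective: alternative
-- what changed: A is one stateful while-loop that merges repeated edges on the fly with a three-way dict branch plus a second while-loop for accepts; B is four staged passes: locate the '#' boundary with next/enumerate, group regexes per (src,dst) into lists with setdefault/append, fold each list with reduce(union) in a dict comprehension, then write accepts via setdefault.
import Mathlib
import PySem

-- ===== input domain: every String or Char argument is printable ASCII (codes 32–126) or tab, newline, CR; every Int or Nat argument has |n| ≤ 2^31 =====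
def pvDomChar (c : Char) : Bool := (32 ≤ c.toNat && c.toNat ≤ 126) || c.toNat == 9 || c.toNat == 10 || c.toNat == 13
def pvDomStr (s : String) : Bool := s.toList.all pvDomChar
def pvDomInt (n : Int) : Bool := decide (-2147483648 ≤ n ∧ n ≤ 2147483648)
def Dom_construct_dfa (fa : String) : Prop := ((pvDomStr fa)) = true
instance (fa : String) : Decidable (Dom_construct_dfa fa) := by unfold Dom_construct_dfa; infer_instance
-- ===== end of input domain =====

-- B replaces A's single merge-as-you-go while-loop (union applied inside the scan, three-way
-- dict branch per line) by four staged passes: find the '#' cut, group regexes per (src,dst)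
-- into lists, fold each list with union, then write accepts; same cost, different structure.

-- ===== PORT A =====

-- ε value used in the output dicts, as a char list
def pvEps : List Char := ['\u03B5']

-- union(*args) of Source A, on char lists (strings are carried as List Char; PySem.Chars.len = len)
def unionChars (args : List (List Char)) : List Char :=
  let st := args.foldl (fun (st : Bool × List Char) r =>
    if r = [] then st
    else
      let ret := if st.1 = false ∧ 2 ≤ PySem.Chars.len r
                 then st.2 ++ ('(' :: r ++ [')']) else st.2 ++ r
      let ret := if ret ≠ [] then ret ++ ['U'] else ret
      (false, ret)) (true, [])
  PySem.List.slice st.2 none (some (-1))   -- ret[:-1]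

abbrev TransD := PySem.Dict String (PySem.Dict String (List Char))

-- the body of A's first while loop for one well-formed transition line
def edgeStepA (d : TransD) (src dst regex : String) : TransD :=
  if d.contains src = false then
    d.insert src (PySem.Dict.empty.insert dst regex.toList)
  else
    let inner := d.getD src PySem.Dict.empty
    if inner.contains dst then
      d.insert src (inner.insert dst (unionChars [regex.toList, inner.getD dst []]))
    else
      d.insert src (inner.insert dst regex.toList)

-- A's first while loop; returns the dict and the lines left for the accept loop.
-- The three error exits (IndexError on lines[i][0], ValueError on the two unpacking
-- splits) return the state so far; those inputs are excluded by Pre_construct_dfa.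
def loopA : List String → TransD → TransD × List String
  | [], d => (d, [])
  | l :: rest, d =>
    match PySem.Str.pyGet? l 0 with
    | none => (d, [])                       -- IndexError (empty line)
    | some c =>
      if c = '#' then (d, rest)
      else
        match PySem.Str.split? l ":" with
        | some [src, tmp] =>
          match PySem.Str.split? tmp ">" with
          | some [regex, dst] => loopA rest (edgeStepA d src dst regex)
          | _ => (d, [])                    -- ValueError
        | _ => (d, [])                      -- ValueError

-- A's second while loop (accept states)
def acceptA : List String → TransD → TransD
  | [], d => d
  | s :: rest, d =>
    if d.contains s = false then
      acceptA rest (d.insert s (PySem.Dict.empty.insert "end" pvEps))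
    else
      acceptA rest (d.insert s ((d.getD s PySem.Dict.empty).insert "end" pvEps))

def construct_dfa (fa : String) : List (String × List (String × String)) :=
  let lines := (PySem.Str.split? fa "\n").getD [""]   -- sep "\n" ≠ "": split? is never none
  let start_state := lines.headD ""                   -- lines[0]; split? never returns []
  let d0 : TransD := (PySem.Dict.empty.insert "start"
      (PySem.Dict.empty.insert start_state pvEps)).insert "end" PySem.Dict.empty
  let pr := loopA (lines.drop 2) d0                   -- i += 2, then the arrow loop
  let d2 := acceptA pr.2 pr.1
  d2.items.map (fun p => (p.1, p.2.items.map (fun q => (q.1, String.ofList q.2))))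

-- ===== PORT B =====

abbrev GroupsD := PySem.Dict String (PySem.Dict String (List (List Char)))

-- _parse(line): the two unpacking splits, as an Option (src, dst, regex)
def parseEdge (l : String) : Option (String × String × String) :=
  match PySem.Str.split? l ":" with
  | some [src, tmp] =>
    match PySem.Str.split? tmp ">" with
    | some [regex, dst] => some (src, dst, regex)
    | _ => none                             -- ValueError in _parse
  | _ => none                               -- ValueError in _parse

-- stage 1: cut = next((k for k, l in enumerate(body) if l[0] == '#'), len(body))
def cutIdx : List String → Nat
  | [] => 0
  | l :: rest => if PySem.Str.pyGet? l 0 = some '#' then 0 else cutIdx rest + 1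

-- stage 2 body: groups.setdefault(src, {}).setdefault(dst, []).append(regex),
-- i.e. groups[src] = groups.get(src, {}) with regex appended at dst (Dict.modify)
def edgeStepB (g : GroupsD) (src dst regex : String) : GroupsD :=
  g.modify src PySem.Dict.empty
    (fun inner => inner.modify dst [] (fun rs => rs ++ [regex.toList]))

def groupStep (g : GroupsD) (l : String) : GroupsD :=
  match parseEdge l with
  | some (src, dst, regex) => edgeStepB g src dst regex
  | none => g                               -- unreachable under Pre_construct_dfa

-- stage 3: reduce(lambda acc, r: union(r, acc), rs[1:], rs[0]); grouped lists are never empty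
def foldRegexes (rs : List (List Char)) : List Char :=
  match rs with
  | [] => []
  | r0 :: rest => rest.foldl (fun acc r => unionChars [r, acc]) r0

-- the dict comprehension of Source B's stage 3
def buildTransition (g : GroupsD) : TransD :=
  g.items.foldl (fun t p =>
    t.insert p.1 (p.2.items.foldl (fun inr q => inr.insert q.1 (foldRegexes q.2))
      PySem.Dict.empty)) PySem.Dict.empty

def construct_dfa_alt (fa : String) : List (String × List (String × String)) :=
  let lines := (PySem.Str.split? fa "\n").getD [""]
  let body := lines.drop 2
  let cut := cutIdx body
  let g0 : GroupsD := (PySem.Dict.empty.insert "start"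
      (PySem.Dict.empty.insert (lines.headD "") [pvEps])).insert "end" PySem.Dict.empty
  let g := (body.take cut).foldl groupStep g0
  -- stage 4: transition.setdefault(s, {})["end"] = e, i.e. Dict.modify over the accept lines
  let t2 := (body.drop (cut + 1)).foldl
    (fun d s => d.modify s PySem.Dict.empty (fun inner => inner.insert "end" pvEps))
    (buildTransition g)
  t2.items.map (fun p => (p.1, p.2.items.map (fun q => (q.1, String.ofList q.2))))

-- ===== PRECONDITION & SPEC =====

-- Pre_ excludes exactly the inputs on which Source A raises: a transition line (between the
-- skipped first two lines and the first '#'-starting line) that is empty (IndexError on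
-- line[0]), or does not split on ':' into exactly two parts, or whose part after ':' does
-- not split on '>' into exactly two parts (ValueError in the unpacking assignments).
def pvGoodLine (l : String) : Bool :=
  match PySem.Str.split? l ":" with
  | some [_, tmp] =>
    match PySem.Str.split? tmp ">" with
    | some [_, _] => true
    | _ => false
  | _ => false

def pvGoodLines : List String → Bool
  | [] => true
  | l :: rest =>
    if PySem.Str.pyGet? l 0 = some '#' then true else pvGoodLine l && pvGoodLines rest

def Pre_construct_dfa (fa : String) : Prop :=
  pvGoodLines (((PySem.Str.split? fa "\n").getD [""]).drop 2) = true

instance (fa : String) : Decidable (Pre_construct_dfa fa) := by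
  unfold Pre_construct_dfa; infer_instance

def pvWitness_construct_dfa : String := "q0\nq0 q1\nq0:a>q1\nq0:b>q0\nq1:a>q1\n#\nq1"

def Spec_construct_dfa (fa : String) (out : List (String × List (String × String))) : Prop := out = construct_dfa_alt fa
instance (fa : String) (out : List (String × List (String × String))) : Decidable (Spec_construct_dfa fa out) := by unfold Spec_construct_dfa; infer_instance

-- ===== CLAIM (what is proved, stated in full; the proofs are below) =====
def Claim_equal_construct_dfa : Prop := ∀ (fa : String), Dom_construct_dfa fa → Pre_construct_dfa fa → Spec_construct_dfa fa (construct_dfa fa)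

-- ===== LEMMAS AND PROOFS =====

-- map a function over the values of a dict, keeping keys and order
def mapVals {κ ν ν' : Type} [BEq κ] (h : ν → ν') (d : PySem.Dict κ ν) : PySem.Dict κ ν' :=
  PySem.Dict.mk (d.items.map (fun p => (p.1, h p.2)))

theorem contains_mapVals {κ ν ν' : Type} [BEq κ] (h : ν → ν') (d : PySem.Dict κ ν) (k : κ) :
    (mapVals h d).contains k = d.contains k := by
  simp only [mapVals, PySem.Dict.contains, List.any_map]
  rfl

theorem get?_mapVals {κ ν ν' : Type} [BEq κ] (h : ν → ν') (d : PySem.Dict κ ν) (k : κ) :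
    (mapVals h d).get? k = (d.get? k).map h := by
  obtain ⟨l⟩ := d
  induction l with
  | nil => rfl
  | cons q t ih =>
    obtain ⟨qk, qv⟩ := q
    show (PySem.Dict.mk ((qk, h qv) :: t.map (fun p => (p.1, h p.2)))).get? k
      = ((PySem.Dict.mk ((qk, qv) :: t)).get? k).map h
    rw [PySem.Dict.get?_mk_cons, PySem.Dict.get?_mk_cons]
    by_cases hk : (qk == k) = true
    · simp [hk]
    · simp only [hk, Bool.false_eq_true, if_false]
      exact ih

theorem mapVals_insert {κ ν ν' : Type} [BEq κ] [LawfulBEq κ] (h : ν → ν')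
    (d : PySem.Dict κ ν) (k : κ) (v : ν) :
    mapVals h (d.insert k v) = (mapVals h d).insert k (h v) := by
  apply PySem.Dict.ext
  by_cases hc : d.contains k = true
  · rw [show (mapVals h (d.insert k v)).items
        = (d.insert k v).items.map (fun p => (p.1, h p.2)) from rfl,
      PySem.Dict.items_insert_of_contains d v hc,
      PySem.Dict.items_insert_of_contains (mapVals h d) (h v)
        (by rw [contains_mapVals]; exact hc)]
    show (d.items.map _).map _ = (d.items.map _).map _
    rw [List.map_map, List.map_map]
    refine List.map_congr_left (fun p _ => ?_)
    by_cases hk : (p.1 == k) = true <;> simp [Function.comp, hk]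
  · rw [show (mapVals h (d.insert k v)).items
        = (d.insert k v).items.map (fun p => (p.1, h p.2)) from rfl,
      PySem.Dict.items_insert_of_not_contains d v (by simpa using hc),
      PySem.Dict.items_insert_of_not_contains (mapVals h d) (h v)
        (by rw [contains_mapVals]; simpa using hc)]
    simp [mapVals]

-- correspondence: A's dict is B's grouped dict with every regex list folded
def mapInnerG (gi : PySem.Dict String (List (List Char))) : PySem.Dict String (List Char) :=
  mapVals foldRegexes gi

def mapOuterG (g : GroupsD) : TransD := mapVals mapInnerG g

theorem mapInnerG_insert (gi : PySem.Dict String (List (List Char))) (k : String) (v : List (List Char)) :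
    mapInnerG (gi.insert k v) = (mapInnerG gi).insert k (foldRegexes v) :=
  mapVals_insert foldRegexes gi k v

theorem mapOuterG_insert (g : GroupsD) (k : String) (v : PySem.Dict String (List (List Char))) :
    mapOuterG (g.insert k v) = (mapOuterG g).insert k (mapInnerG v) :=
  mapVals_insert mapInnerG g k v

-- invariant on B's grouped dict: unique keys at both levels, no empty regex list
def InvG (g : GroupsD) : Prop :=
  g.keys.Nodup ∧ ∀ p ∈ g.items, p.2.keys.Nodup ∧ ∀ q ∈ p.2.items, q.2 ≠ []

theorem foldRegexes_append (rs : List (List Char)) (r : List Char) (h : rs ≠ []) :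
    foldRegexes (rs ++ [r]) = unionChars [r, foldRegexes rs] := by
  obtain ⟨r0, rest, rfl⟩ := List.exists_cons_of_ne_nil h
  show ((rest ++ [r]).foldl _ r0) = _
  rw [List.foldl_append]
  rfl

-- the grouping step rewrites the src entry to "old inner with regex appended at dst"
theorem edgeStepB_eq (g : GroupsD) (src dst regex : String) :
    edgeStepB g src dst regex
      = g.insert src ((g.getD src PySem.Dict.empty).insert dst
          ((g.getD src PySem.Dict.empty).getD dst [] ++ [regex.toList])) := by
  rfl

theorem edgeStep_sim (g : GroupsD) (src dst regex : String) (hinv : InvG g) :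
    edgeStepA (mapOuterG g) src dst regex = mapOuterG (edgeStepB g src dst regex) := by
  rw [edgeStepB_eq]
  unfold edgeStepA
  by_cases hc : g.contains src = true
  · have hcA : ¬ ((mapOuterG g).contains src = false) := by
      rw [mapOuterG, contains_mapVals, hc]; simp
    rw [if_neg hcA]
    have hsomeg : (g.get? src).isSome := by
      rw [← PySem.Dict.contains_eq_isSome_get?]; exact hc
    obtain ⟨gi, hgi⟩ := Option.isSome_iff_exists.mp hsomeg
    have hgiD : g.getD src PySem.Dict.empty = gi := PySem.Dict.getD_of_get?_eq_some g _ hgi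
    have hinner : (mapOuterG g).getD src PySem.Dict.empty = mapInnerG gi := by
      rw [PySem.Dict.getD_eq_get?_getD, mapOuterG, get?_mapVals, hgi]; rfl
    have hgi_mem : (src, gi) ∈ g.items := PySem.Dict.mem_items_of_get?_eq_some g hgi
    have hgiInv := hinv.2 _ hgi_mem
    rw [mapOuterG_insert, hgiD, hinner]
    congr 1
    rw [mapInnerG_insert]
    by_cases hd : gi.contains dst = true
    · have hdA : (mapInnerG gi).contains dst = true := by
        rw [mapInnerG, contains_mapVals]; exact hd
      rw [if_pos hdA]
      have hsomed : (gi.get? dst).isSome := by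
        rw [← PySem.Dict.contains_eq_isSome_get?]; exact hd
      obtain ⟨rs, hrs⟩ := Option.isSome_iff_exists.mp hsomed
      have hrsD : gi.getD dst [] = rs := PySem.Dict.getD_of_get?_eq_some gi _ hrs
      have hrsA : (mapInnerG gi).getD dst [] = foldRegexes rs := by
        rw [PySem.Dict.getD_eq_get?_getD, mapInnerG, get?_mapVals, hrs]; rfl
      have hne : rs ≠ [] := hgiInv.2 _ (PySem.Dict.mem_items_of_get?_eq_some gi hrs)
      rw [hrsD, hrsA, foldRegexes_append rs _ hne]
    · have hd' : gi.contains dst = false := by simpa using hd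
      have hdA : ¬ ((mapInnerG gi).contains dst = true) := by
        rw [mapInnerG, contains_mapVals, hd']; simp
      rw [if_neg hdA, PySem.Dict.getD_of_not_contains gi _ hd']
      rfl
  · have hc' : g.contains src = false := by simpa using hc
    have hcA : (mapOuterG g).contains src = false := by
      rw [mapOuterG, contains_mapVals]; exact hc'
    rw [if_pos hcA, PySem.Dict.getD_of_not_contains g _ hc', mapOuterG_insert, mapInnerG_insert]
    rfl

theorem invG_edgeStepB (g : GroupsD) (src dst regex : String) (hinv : InvG g) :
    InvG (edgeStepB g src dst regex) := by
  rw [edgeStepB_eq]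
  set gi := g.getD src PySem.Dict.empty with hgi
  have hgiInv : gi.keys.Nodup ∧ ∀ q ∈ gi.items, q.2 ≠ [] := by
    by_cases hc : g.contains src = true
    · have hsome : (g.get? src).isSome := by
        rw [← PySem.Dict.contains_eq_isSome_get?]; exact hc
      obtain ⟨gi', hgi'⟩ := Option.isSome_iff_exists.mp hsome
      have : gi = gi' := by rw [hgi]; exact PySem.Dict.getD_of_get?_eq_some g _ hgi'
      rw [this]
      have hmem : (src, gi') ∈ g.items := PySem.Dict.mem_items_of_get?_eq_some g hgi'
      exact ⟨(hinv.2 _ hmem).1, (hinv.2 _ hmem).2⟩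
    · have hc' : g.contains src = false := by simpa using hc
      rw [hgi, PySem.Dict.getD_of_not_contains g _ hc']
      exact ⟨by simp [PySem.Dict.keys, PySem.Dict.empty], by simp [PySem.Dict.empty, PySem.Dict.items]⟩
  refine ⟨PySem.Dict.nodup_keys_insert _ _ _ hinv.1, ?_⟩
  intro p hp
  rw [PySem.Dict.mem_items_insert] at hp
  rcases hp with rfl | ⟨hp, -⟩
  · refine ⟨PySem.Dict.nodup_keys_insert _ _ _ hgiInv.1, ?_⟩
    intro q hq
    rw [PySem.Dict.mem_items_insert] at hq
    rcases hq with rfl | ⟨hq, -⟩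
    · simp
    · exact hgiInv.2 _ hq
  · exact hinv.2 _ hp

-- from pvGoodLine, extract the two split shapes
theorem pvGoodLine_shape (l : String) (h : pvGoodLine l = true) :
    ∃ src tmp regex dst, PySem.Str.split? l ":" = some [src, tmp]
      ∧ PySem.Str.split? tmp ">" = some [regex, dst] := by
  unfold pvGoodLine at h
  split at h
  · next src tmp h1 =>
    split at h
    · next regex dst h2 => exact ⟨src, tmp, regex, dst, h1, h2⟩
    · exact absurd h (by simp)
  · exact absurd h (by simp)

-- a line that splits on ':' into two parts is nonempty, so line[0] exists
theorem pyGet0_of_split2 (l src tmp : String)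
    (h : PySem.Str.split? l ":" = some [src, tmp]) :
    ∃ c, PySem.Str.pyGet? l 0 = some c := by
  cases hg : PySem.Str.pyGet? l 0 with
  | some c => exact ⟨c, rfl⟩
  | none =>
    have hnil : l.toList = [] := by
      cases hl : l.toList with
      | nil => rfl
      | cons a t =>
        rw [PySem.Str.pyGet?, hl] at hg
        simp [PySem.Chars.pyGet?, PySem.List.pyGet?, PySem.List.pyIdx?] at hg
    have : l = "" := String.toList_eq_nil_iff.mp hnil
    subst this
    rw [show PySem.Str.split? "" ":" = some [""] from by decide] at h
    exact absurd h (by simp)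

-- A's arrow loop, simulated by B's staged cut + grouping fold, on good lines
theorem loop_sim (ls : List String) (g : GroupsD)
    (hg : pvGoodLines ls = true) (hinv : InvG g) :
    loopA ls (mapOuterG g)
      = (mapOuterG ((ls.take (cutIdx ls)).foldl groupStep g), ls.drop (cutIdx ls + 1))
    ∧ InvG ((ls.take (cutIdx ls)).foldl groupStep g) := by
  induction ls generalizing g with
  | nil => exact ⟨rfl, hinv⟩
  | cons l rest ih =>
    by_cases hhash : PySem.Str.pyGet? l 0 = some '#'
    · rw [loopA, hhash]
      rw [show cutIdx (l :: rest) = 0 from by simp only [cutIdx, if_pos hhash]]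
      exact ⟨by simp, hinv⟩
    · rw [pvGoodLines, if_neg hhash, Bool.and_eq_true] at hg
      obtain ⟨src, tmp, regex, dst, h1, h2⟩ := pvGoodLine_shape l hg.1
      obtain ⟨c, hc⟩ := pyGet0_of_split2 l src tmp h1
      have hcne : c ≠ '#' := by rintro rfl; exact hhash hc
      have hpe : parseEdge l = some (src, dst, regex) := by
        simp only [parseEdge, h1, h2]
      have hcut : cutIdx (l :: rest) = cutIdx rest + 1 := by
        simp only [cutIdx, if_neg hhash]
      rw [loopA, hc]
      simp only [if_neg hcne, h1, h2]
      have hinv' := invG_edgeStepB g src dst regex hinv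
      have hstep : groupStep g l = edgeStepB g src dst regex := by
        unfold groupStep; rw [hpe]
      obtain ⟨hsim, hinv''⟩ := ih (edgeStepB g src dst regex) hg.2 hinv'
      rw [edgeStep_sim g src dst regex hinv, hsim, hcut]
      refine ⟨?_, ?_⟩
      · simp only [List.take_succ_cons, List.foldl_cons, List.drop_succ_cons, hstep]
      · simpa only [List.take_succ_cons, List.foldl_cons, hstep] using hinv''

theorem innerBuild_eq (gi : PySem.Dict String (List (List Char))) (h : gi.keys.Nodup) :
    gi.items.foldl (fun inr q => inr.insert q.1 (foldRegexes q.2)) PySem.Dict.empty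
      = mapInnerG gi := by
  apply PySem.Dict.ext
  rw [PySem.Dict.items_foldl_insert_fresh gi.items (fun q => q.1) (fun q => foldRegexes q.2)
    PySem.Dict.empty (fun a _ => PySem.Dict.contains_empty _) h]
  rfl

theorem buildTransition_eq (g : GroupsD) (hinv : InvG g) :
    buildTransition g = mapOuterG g := by
  apply PySem.Dict.ext
  unfold buildTransition
  rw [PySem.Dict.items_foldl_insert_fresh g.items (fun p => p.1)
    (fun p => p.2.items.foldl (fun inr q => inr.insert q.1 (foldRegexes q.2)) PySem.Dict.empty)
    PySem.Dict.empty (fun a _ => PySem.Dict.contains_empty _) hinv.1]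
  show g.items.map _ = g.items.map _
  refine List.map_congr_left (fun p hp => ?_)
  rw [innerBuild_eq p.2 (hinv.2 _ hp).1]

-- A's accept while-loop IS B's foldl of Dict.modify
theorem accept_eq (ls : List String) (d : TransD) :
    acceptA ls d
      = ls.foldl (fun d s => d.modify s PySem.Dict.empty (fun inner => inner.insert "end" pvEps)) d := by
  induction ls generalizing d with
  | nil => rfl
  | cons s rest ih =>
    rw [acceptA, List.foldl_cons]
    by_cases h : d.contains s = false
    · rw [if_pos h, show d.modify s PySem.Dict.empty (fun inner => inner.insert "end" pvEps)
          = d.insert s (PySem.Dict.empty.insert "end" pvEps) from by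
            rw [PySem.Dict.modify, PySem.Dict.getD_of_not_contains d _ h]]
      exact ih _
    · rw [if_neg h, show d.modify s PySem.Dict.empty (fun inner => inner.insert "end" pvEps)
          = d.insert s ((d.getD s PySem.Dict.empty).insert "end" pvEps) from rfl]
      exact ih _

-- ===== VERDICT (by name: the statement is the Claim_ definition above) =====
theorem construct_dfa_spec : Claim_equal_construct_dfa := by
  intro fa _ hpre
  unfold Pre_construct_dfa at hpre
  show construct_dfa fa = construct_dfa_alt fa
  unfold construct_dfa construct_dfa_alt
  set lines := (PySem.Str.split? fa "\n").getD [""] with hlines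
  have hinv0 : InvG ((PySem.Dict.empty.insert "start"
      (PySem.Dict.empty.insert (lines.headD "") [pvEps])).insert "end" PySem.Dict.empty) := by
    constructor
    · simp [PySem.Dict.keys, PySem.Dict.insert, PySem.Dict.empty, PySem.Dict.contains]
    · intro p hp
      simp [PySem.Dict.insert, PySem.Dict.empty, PySem.Dict.contains] at hp
      rcases hp with rfl | rfl
      · refine ⟨by simp [PySem.Dict.keys, PySem.Dict.insert, PySem.Dict.empty, PySem.Dict.contains], ?_⟩
        intro q hq
        simp [PySem.Dict.insert, PySem.Dict.empty] at hq
        subst hq; simp [pvEps]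
      · refine ⟨by simp [PySem.Dict.keys, PySem.Dict.empty], ?_⟩
        intro q hq; simp [PySem.Dict.empty, PySem.Dict.items] at hq
  have hd0 : ((PySem.Dict.empty.insert "start"
      (PySem.Dict.empty.insert (lines.headD "") pvEps)).insert "end" PySem.Dict.empty : TransD)
      = mapOuterG ((PySem.Dict.empty.insert "start"
      (PySem.Dict.empty.insert (lines.headD "") [pvEps])).insert "end" PySem.Dict.empty) := rfl
  obtain ⟨hsim, hinv1⟩ := loop_sim (lines.drop 2) _ hpre hinv0
  simp only [hd0, hsim, accept_eq, buildTransition_eq _ hinv1]
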